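-- pv_equiv track=rewrite | github.com/YoonSeok-Woo/studygroup | yoonseok/1031/극한의 청소작업.py | remove4
-- ===== SOURCE A (Python) =====
-- def remove4(num):
--     t_res = []
--     while num>0:
--         temp = num%10
--         if temp > 4:
--             temp -=1
--         t_res.append(temp)
--         num = num//10
--     res = 0
--     while t_res:
--         res*=9
--         res += t_res.pop()
--
--     return res
-- ===== SOURCE B (Python) =====
-- def remove4(num):
--     if num <= 0:
--         return 0
--     d = num % 10
--     return remove4(num // 10) * 9 + (d - 1 if d > 4 else d)
-- ===== Notes on version B (the rewrite author's own statement) =====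
-- stated objective: simpler
-- what changed: B is a direct top-down recursion (remove4(num//10)*9 + adjusted last digit) with no intermediate list, replacing A's two imperative loops that push digits onto a list and then pop them back for a Horner evaluation.
import Mathlib
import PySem

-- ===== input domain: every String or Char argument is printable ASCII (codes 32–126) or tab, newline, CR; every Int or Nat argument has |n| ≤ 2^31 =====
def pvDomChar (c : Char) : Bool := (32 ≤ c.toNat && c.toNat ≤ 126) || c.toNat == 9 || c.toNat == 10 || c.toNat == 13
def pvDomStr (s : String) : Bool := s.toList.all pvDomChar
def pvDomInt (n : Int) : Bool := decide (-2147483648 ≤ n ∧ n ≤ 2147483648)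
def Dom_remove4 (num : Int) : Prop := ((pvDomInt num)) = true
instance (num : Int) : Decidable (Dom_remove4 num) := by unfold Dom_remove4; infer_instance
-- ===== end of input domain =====

-- B replaces A's two imperative loops (push digits onto a list, then pop for a Horner
-- evaluation) by one direct top-down recursion with no intermediate list (objective: simpler).


-- ===== PORT A =====
-- first while loop: build the list of (adjusted) digits, low digit first.
-- Fuel (= num.toNat at the call site) only makes the recursion structural; it never
-- runs out before the loop's own exit condition num ≤ 0, since num//10 < num for num > 0.
def remove4Digits (fuel : Nat) (num : Int) : List Int :=
  match fuel with
  | 0 => []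
  | fuel + 1 =>
    if num > 0 then
      let temp := PySem.Int.mod num 10
      let temp := if temp > 4 then temp - 1 else temp
      temp :: remove4Digits fuel (PySem.Int.floordiv num 10)
    else []

-- second while loop: pop from the end of t_res, i.e. fold over t_res reversed
def remove4 (num : Int) : Int :=
  let t_res := remove4Digits num.toNat num
  List.foldl (fun res t => res * 9 + t) 0 t_res.reverse

-- ===== PORT B =====
-- same fuel guard (= num.toNat at the call site), purely to make the recursion structural
def remove4AltGo (fuel : Nat) (num : Int) : Int :=
  match fuel with
  | 0 => 0
  | fuel + 1 =>
    if num ≤ 0 then 0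
    else
      let d := PySem.Int.mod num 10
      remove4AltGo fuel (PySem.Int.floordiv num 10) * 9 + (if d > 4 then d - 1 else d)

def remove4_alt (num : Int) : Int := remove4AltGo num.toNat num

-- ===== PRECONDITION & SPEC =====
def Spec_remove4 (num : Int) (out : Int) : Prop := out = remove4_alt num
instance (num : Int) (out : Int) : Decidable (Spec_remove4 num out) := by unfold Spec_remove4; infer_instance

-- ===== CLAIM (what is proved, stated in full; the proofs are below) =====
def Claim_equal_remove4 : Prop := ∀ (num : Int), Dom_remove4 num → Spec_remove4 num (remove4 num)

-- ===== LEMMAS AND PROOFS =====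
-- Horner evaluation of the reversed digit list, as A's second loop computes it
def horner (l : List Int) : Int := List.foldl (fun res t => res * 9 + t) 0 l.reverse

theorem horner_cons (t : Int) (l : List Int) : horner (t :: l) = horner l * 9 + t := by
  unfold horner
  simp [List.foldl_append]

theorem altGo_eq_horner (fuel : Nat) : ∀ (num : Int),
    remove4AltGo fuel num = horner (remove4Digits fuel num) := by
  induction fuel with
  | zero => intro num; simp [remove4AltGo, remove4Digits, horner]
  | succ fuel ih =>
      intro num
      rw [remove4AltGo, remove4Digits]
      by_cases h : num > 0
      · simp only [if_pos h, if_neg (by omega : ¬ num ≤ 0)]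
        rw [ih, horner_cons]
      · simp [if_neg h, if_pos (by omega : num ≤ 0), horner]

-- ===== VERDICT (by name: the statement is the Claim_ definition above) =====
theorem remove4_spec : Claim_equal_remove4 := by
  intro num _
  show remove4 num = remove4_alt num
  rw [remove4_alt, altGo_eq_horner]
  simp [remove4, horner]
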